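-- pv_equiv track=rewrite | github.com/doobMM/hibari_tda | tda_pipeline/_archived_pre_unify/run_module_generation.py | replicate_inst2
-- ===== SOURCE A (Python) =====
-- def replicate_inst2(module_notes, n_copies, module_len, initial_offset, rest_gap=1):
--     """한 모듈의 note를 inst 2 position에 배치.
--
--     - 처음 initial_offset timesteps은 silence
--     - 각 copy 사이에 rest_gap timesteps의 rest
--     - k번째 copy는 t = [initial_offset + k*(module_len + rest_gap),
--                          initial_offset + k*(module_len + rest_gap) + module_len) 범위
--     """
--     replicated = []
--     period = module_len + rest_gap
--     for m in range(n_copies):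
--         copy_start = initial_offset + m * period
--         for s, pitch, e in module_notes:
--             new_s = s + copy_start
--             new_e = e + copy_start
--             if new_e > copy_start + module_len:
--                 new_e = copy_start + module_len
--             if new_s < copy_start + module_len and new_e > new_s:
--                 replicated.append((new_s, pitch, new_e))
--     return replicated
-- ===== SOURCE B (Python) =====
-- def replicate_inst2(module_notes, n_copies, module_len, initial_offset, rest_gap=1):
--     template = []
--     for s, pitch, e in module_notes:
--         ec = min(e, module_len)
--         if s < module_len and ec > s:
--             template.append((s, pitch, ec))
--     period = module_len + rest_gap
--     out = []
--     for m in range(n_copies):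
--         copy_start = initial_offset + m * period
--         out.extend((s + copy_start, p, ec + copy_start) for s, p, ec in template)
--     return out
-- ===== Notes on version B (the rewrite author's own statement) =====
-- stated objective: faster
-- what changed: Hoists the copy-independent clipping/filtering into a one-pass template (s, pitch, min(e, module_len)) built once, then each copy just offsets the template entries, instead of re-clipping every note inside every copy.
import Mathlib
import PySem

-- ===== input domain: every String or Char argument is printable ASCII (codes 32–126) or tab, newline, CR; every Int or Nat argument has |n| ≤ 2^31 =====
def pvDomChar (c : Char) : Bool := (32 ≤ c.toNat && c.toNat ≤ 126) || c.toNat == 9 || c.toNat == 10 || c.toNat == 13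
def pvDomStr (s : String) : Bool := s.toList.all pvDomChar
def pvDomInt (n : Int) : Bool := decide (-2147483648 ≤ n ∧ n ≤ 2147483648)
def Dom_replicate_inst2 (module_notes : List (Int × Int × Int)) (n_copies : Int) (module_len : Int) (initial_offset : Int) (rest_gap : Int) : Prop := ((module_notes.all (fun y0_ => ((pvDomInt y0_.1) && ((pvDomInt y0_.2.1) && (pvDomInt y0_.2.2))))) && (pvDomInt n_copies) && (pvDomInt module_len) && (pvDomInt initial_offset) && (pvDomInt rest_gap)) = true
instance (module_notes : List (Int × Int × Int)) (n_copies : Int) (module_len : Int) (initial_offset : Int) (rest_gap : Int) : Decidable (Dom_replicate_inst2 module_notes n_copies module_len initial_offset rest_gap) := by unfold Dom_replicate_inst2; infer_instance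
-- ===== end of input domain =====

-- B builds the copy-independent clipped template once, then offsets it per copy,
-- instead of re-clipping every note inside every copy (objective: faster, constant factor).

-- ===== PORT A =====
-- literal transliteration of A: nested loops, clip and filter per copy
def replicate_inst2 (module_notes : List (Int × Int × Int)) (n_copies : Int) (module_len : Int) (initial_offset : Int) (rest_gap : Int) : List (Int × Int × Int) :=
  let period := module_len + rest_gap
  (PySem.List.pyRange 0 n_copies 1).foldl (fun replicated m =>
    let copy_start := initial_offset + m * period
    module_notes.foldl (fun replicated note =>
      let s := note.1; let pitch := note.2.1; let e := note.2.2
      let new_s := s + copy_start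
      let new_e0 := e + copy_start
      let new_e := if new_e0 > copy_start + module_len then copy_start + module_len else new_e0
      if new_s < copy_start + module_len ∧ new_e > new_s then
        replicated ++ [(new_s, pitch, new_e)]
      else replicated) replicated) []

-- ===== PORT B =====
-- transliteration of Source B: template pass, then offset pass per copy
def replicate_inst2_alt (module_notes : List (Int × Int × Int)) (n_copies : Int) (module_len : Int) (initial_offset : Int) (rest_gap : Int) : List (Int × Int × Int) :=
  let template := module_notes.foldl (fun template note =>
    let s := note.1; let pitch := note.2.1; let e := note.2.2
    let ec := min e module_len
    if s < module_len ∧ ec > s then template ++ [(s, pitch, ec)] else template) []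
  let period := module_len + rest_gap
  (PySem.List.pyRange 0 n_copies 1).foldl (fun out m =>
    let copy_start := initial_offset + m * period
    out ++ template.map (fun t => (t.1 + copy_start, t.2.1, t.2.2 + copy_start))) []

-- ===== PRECONDITION & SPEC =====
def Spec_replicate_inst2 (module_notes : List (Int × Int × Int)) (n_copies : Int) (module_len : Int) (initial_offset : Int) (rest_gap : Int) (out : List (Int × Int × Int)) : Prop := out = replicate_inst2_alt module_notes n_copies module_len initial_offset rest_gap
instance (module_notes : List (Int × Int × Int)) (n_copies : Int) (module_len : Int) (initial_offset : Int) (rest_gap : Int) (out : List (Int × Int × Int)) : Decidable (Spec_replicate_inst2 module_notes n_copies module_len initial_offset rest_gap out) := by unfold Spec_replicate_inst2; infer_instance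

-- ===== CLAIM (what is proved, stated in full; the proofs are below) =====
def Claim_equal_replicate_inst2 : Prop := ∀ (module_notes : List (Int × Int × Int)) (n_copies : Int) (module_len : Int) (initial_offset : Int) (rest_gap : Int), Dom_replicate_inst2 module_notes n_copies module_len initial_offset rest_gap → Spec_replicate_inst2 module_notes n_copies module_len initial_offset rest_gap (replicate_inst2 module_notes n_copies module_len initial_offset rest_gap)

-- ===== LEMMAS AND PROOFS =====

-- per-copy: A's clipped/filtered notes equal B's template offset by copy_start
theorem pvPerCopy_eq (copy_start module_len : Int) (notes : List (Int × Int × Int)) :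
    (notes.filter (fun note => decide (note.1 + copy_start < copy_start + module_len ∧
        (if note.2.2 + copy_start > copy_start + module_len then copy_start + module_len
         else note.2.2 + copy_start) > note.1 + copy_start))).map
      (fun note => (note.1 + copy_start, note.2.1,
        if note.2.2 + copy_start > copy_start + module_len then copy_start + module_len
        else note.2.2 + copy_start)) =
    ((notes.filter (fun note => decide (note.1 < module_len ∧ min note.2.2 module_len > note.1))).map
      (fun note => (note.1, note.2.1, min note.2.2 module_len))).map
      (fun t => (t.1 + copy_start, t.2.1, t.2.2 + copy_start)) := by
  induction notes with
  | nil => rfl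
  | cons n ns ih =>
    simp only [List.filter_cons]
    by_cases hk : n.1 < module_len ∧ min n.2.2 module_len > n.1
    · have hA : n.1 + copy_start < copy_start + module_len ∧
          (if n.2.2 + copy_start > copy_start + module_len then copy_start + module_len
           else n.2.2 + copy_start) > n.1 + copy_start := by
        refine ⟨by omega, ?_⟩
        by_cases hc : n.2.2 + copy_start > copy_start + module_len
        · rw [if_pos hc]; omega
        · rw [if_neg hc]; omega
      rw [if_pos (by simpa using hA), if_pos (by simpa using hk)]
      have hval : (if n.2.2 + copy_start > copy_start + module_len then copy_start + module_len
          else n.2.2 + copy_start) = min n.2.2 module_len + copy_start := by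
        by_cases hc : n.2.2 + copy_start > copy_start + module_len
        · rw [if_pos hc]; omega
        · rw [if_neg hc]; omega
      simp only [List.map_cons, ih, hval]
    · have hA : ¬ (n.1 + copy_start < copy_start + module_len ∧
          (if n.2.2 + copy_start > copy_start + module_len then copy_start + module_len
           else n.2.2 + copy_start) > n.1 + copy_start) := by
        intro ⟨h1, h2⟩
        apply hk
        refine ⟨by omega, ?_⟩
        by_cases hc : n.2.2 + copy_start > copy_start + module_len
        · rw [if_pos hc] at h2; omega
        · rw [if_neg hc] at h2; omega
      rw [if_neg (by simpa using hA), if_neg (by simpa using hk)]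
      exact ih

-- ===== VERDICT (by name: the statement is the Claim_ definition above) =====
theorem replicate_inst2_spec : Claim_equal_replicate_inst2 := by
  intro module_notes n_copies module_len initial_offset rest_gap _
  unfold Spec_replicate_inst2 replicate_inst2 replicate_inst2_alt
  apply PySem.List.foldl_congr_mem
  intro acc m _
  rw [PySem.List.foldl_append_ite, PySem.List.foldl_append_ite]
  rw [pvPerCopy_eq (initial_offset + m * (module_len + rest_gap)) module_len module_notes]
  simp
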